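-- pv_equiv track=rewrite | github.com/osmancan-sari/Lab-Sessions | Lab_4/decryption.py | decrypt_word
-- ===== SOURCE A (Python) =====
-- def decrypt_word(word):
--     if len(word) == 0:
--         # BASE CASE: Trace back if the word has no letters anymore!
--         return ""
--
--     if word[0] < word[-1]:
--         sub_word = decrypt_word(word[1:-1]) + word[-1] # if leftmost is smaller, remove leftmost one
--         return sub_word
--         # rightmost letter will be retained in the end; so, string addition performed before the further comparisons
--         # recursion starts with the remaining letters!
--     else:
--         sub_word = word[0] + decrypt_word(word[1:-1]) # if rightmost is smaller, remove the rightmost one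
--         return sub_word
-- ===== SOURCE B (Python) =====
-- def decrypt_word(word):
--     pre = []
--     suf = []
--     i, j = 0, len(word) - 1
--     while i < j:
--         if word[i] < word[j]:
--             suf.append(word[j])
--         else:
--             pre.append(word[i])
--         i += 1
--         j -= 1
--     if i == j:
--         pre.append(word[i])
--     suf.reverse()
--     return ''.join(pre) + ''.join(suf)
-- ===== Notes on version B (the rewrite author's own statement) =====
-- stated objective: faster
-- what changed: Replaced the O(n^2) recursion (each level reslices word[1:-1] and concatenates strings) by a single two-pointer pass that collects kept-left chars in a prefix list and kept-right chars in a suffix list, joined once at the end.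
import Mathlib
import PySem

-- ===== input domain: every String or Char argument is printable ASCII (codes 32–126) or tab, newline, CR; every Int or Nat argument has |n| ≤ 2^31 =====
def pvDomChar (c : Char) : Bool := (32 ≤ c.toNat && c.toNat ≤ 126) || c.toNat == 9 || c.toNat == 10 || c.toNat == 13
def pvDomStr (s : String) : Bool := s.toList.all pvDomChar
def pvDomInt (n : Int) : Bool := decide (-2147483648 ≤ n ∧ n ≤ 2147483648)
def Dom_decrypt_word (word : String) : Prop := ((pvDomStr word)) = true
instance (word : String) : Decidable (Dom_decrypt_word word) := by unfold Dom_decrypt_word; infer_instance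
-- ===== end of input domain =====

-- Header: B replaces A's quadratic recursion (reslicing word[1:-1] each level) by one
-- two-pointer pass accumulating prefix/suffix lists; proved to return the same string.


-- ===== PORT A =====
-- A's recursion over the characters; (l.drop 1).dropLast is exactly word[1:-1]
-- (for a nonempty list), l.head is word[0], l.getLast is word[-1].
def decryptA (l : List Char) : List Char :=
  if hl : l = [] then
    []
  else
    if l.head hl < l.getLast hl then
      decryptA ((l.drop 1).dropLast) ++ [l.getLast hl]
    else
      l.head hl :: decryptA ((l.drop 1).dropLast)
termination_by l.length
decreasing_by
  have : (l.drop 1).length < l.length := by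
    have : l.length ≠ 0 := by simpa using hl
    simp; omega
  calc ((l.drop 1).dropLast).length ≤ (l.drop 1).length := by
        simp [List.length_dropLast]
    _ < l.length := this
  · have : (l.drop 1).length < l.length := by
      have : l.length ≠ 0 := by simpa using hl
      simp; omega
    calc ((l.drop 1).dropLast).length ≤ (l.drop 1).length := by
          simp [List.length_dropLast]
      _ < l.length := this

def decrypt_word (word : String) : String := String.mk (decryptA word.toList)

-- ===== PORT B =====
-- the while loop: indices i, j as Python ints; pre/suf are the two accumulator lists.
-- the indexed accesses word[i], word[j] are always in range when taken (0 ≤ i < j < len).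
def loopB (s : List Char) (i j : Int) (pre suf : List Char) : List Char × List Char :=
  if _ : i < j then
    if PySem.List.pyGetD s i ' ' < PySem.List.pyGetD s j ' ' then
      loopB s (i + 1) (j - 1) pre (suf ++ [PySem.List.pyGetD s j ' '])
    else
      loopB s (i + 1) (j - 1) (pre ++ [PySem.List.pyGetD s i ' ']) suf
  else if i = j then
    (pre ++ [PySem.List.pyGetD s i ' '], suf)
  else
    (pre, suf)
termination_by (j - i).toNat
decreasing_by all_goals omega

def decrypt_word_alt (word : String) : String :=
  let s := word.toList
  let r := loopB s 0 ((s.length : Int) - 1) [] []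
  String.mk (r.1 ++ r.2.reverse)

-- ===== PRECONDITION & SPEC =====
def Spec_decrypt_word (word : String) (out : String) : Prop := out = decrypt_word_alt word
instance (word : String) (out : String) : Decidable (Spec_decrypt_word word out) := by unfold Spec_decrypt_word; infer_instance

-- ===== CLAIM (what is proved, stated in full; the proofs are below) =====
def Claim_equal_decrypt_word : Prop := ∀ (word : String), Dom_decrypt_word word → Spec_decrypt_word word (decrypt_word word)

-- ===== LEMMAS AND PROOFS =====

-- A's result split into (prefix chars, suffix chars outermost-first)
def gp (l : List Char) : List Char × List Char :=
  if hl : l = [] then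
    ([], [])
  else
    let p := gp ((l.drop 1).dropLast)
    if l.head hl < l.getLast hl then
      (p.1, l.getLast hl :: p.2)
    else
      (l.head hl :: p.1, p.2)
termination_by l.length
decreasing_by
  have : (l.drop 1).length < l.length := by
    have : l.length ≠ 0 := by simpa using hl
    simp; omega
  calc ((l.drop 1).dropLast).length ≤ (l.drop 1).length := by
        simp [List.length_dropLast]
    _ < l.length := this

lemma decryptA_eq_gp (l : List Char) : decryptA l = (gp l).1 ++ (gp l).2.reverse := by
  induction l using gp.induct with
  | case1 => simp [decryptA, gp]
  | case2 l hl hlt ih =>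
      rw [decryptA, gp]
      simp only [List.drop_one] at ih ⊢
      simp [hl, hlt, ih]
  | case3 l hl hlt ih =>
      rw [decryptA, gp]
      simp only [List.drop_one] at ih ⊢
      simp [hl, hlt, ih]

-- the segment s[i..j] (inclusive), for integer indices
def seg (s : List Char) (i j : Int) : List Char :=
  (s.drop i.toNat).take (j - i + 1).toNat

lemma seg_decomp (s : List Char) (i j : Int) (h0 : 0 ≤ i) (hij : i < j)
    (hj : j < (s.length : Int)) :
    seg s i j = s[i.toNat]'(by omega) ::
      (seg s (i + 1) (j - 1) ++ [s[j.toNat]'(by omega)]) := by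
  have hi' : i.toNat < s.length := by omega
  have hj' : j.toNat < s.length := by omega
  have hm : (j - i + 1).toNat = ((j - 1) - (i + 1) + 1).toNat + 1 + 1 := by omega
  unfold seg
  rw [hm, List.drop_eq_getElem_cons hi', List.take_succ_cons]
  congr 1
  have hd : s.drop (i.toNat + 1) = s.drop (i + 1).toNat := by congr 1; omega
  rw [hd, List.take_add_one]
  congr 1
  rw [List.getElem?_drop]
  have he : (i + 1).toNat + ((j - 1) - (i + 1) + 1).toNat = j.toNat := by omega
  rw [he, List.getElem?_eq_getElem hj']
  simp

lemma seg_nil (s : List Char) (i j : Int) (h : j < i) : seg s i j = [] := by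
  unfold seg
  have : (j - i + 1).toNat = 0 := by omega
  simp [this]

lemma seg_single (s : List Char) (i : Int) (h0 : 0 ≤ i) (hi : i < (s.length : Int)) :
    seg s i i = [s[i.toNat]'(by omega)] := by
  have hi' : i.toNat < s.length := by omega
  unfold seg
  have : (i - i + 1).toNat = 1 := by omega
  rw [this, List.drop_eq_getElem_cons hi', List.take_succ_cons, List.take_zero]

lemma gp_cons_concat (c d : Char) (m : List Char) :
    gp (c :: (m ++ [d])) =
      if c < d then ((gp m).1, d :: (gp m).2) else (c :: (gp m).1, (gp m).2) := by
  rw [gp]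
  have h1 : (c :: (m ++ [d])).head (by simp) = c := rfl
  have h2 : (c :: (m ++ [d])).getLast (by simp) = d := by
    rw [List.getLast_eq_getElem]
    simp
  simp [h1, h2]

lemma gp_nil : gp [] = ([], []) := by
  rw [gp]
  simp

lemma gp_single (c : Char) : gp [c] = ([c], []) := by
  rw [gp]
  simp [gp_nil]

lemma loopB_eq (s : List Char) (k : Nat) :
    ∀ (i j : Int) (pre suf : List Char),
      (j - i + 1).toNat ≤ k → 0 ≤ i → j < (s.length : Int) →
      loopB s i j pre suf = (pre ++ (gp (seg s i j)).1, suf ++ (gp (seg s i j)).2) := by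
  induction k with
  | zero =>
      intro i j pre suf hk h0 hj
      have hji : j < i := by omega
      rw [loopB, seg_nil s i j hji]
      rw [gp]
      simp [show ¬ i < j by omega, show i ≠ j by omega]
  | succ k ih =>
      intro i j pre suf hk h0 hj
      rw [loopB]
      by_cases hij : i < j
      · have hci : PySem.List.pyGetD s i ' ' = s[i.toNat]'(by omega) :=
          PySem.List.pyGetD_eq_getElem s ' ' h0 (by omega)
        have hcj : PySem.List.pyGetD s j ' ' = s[j.toNat]'(by omega) :=
          PySem.List.pyGetD_eq_getElem s ' ' (by omega) (by omega)
        rw [seg_decomp s i j h0 hij hj, gp_cons_concat]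
        simp only [dif_pos hij, hci, hcj]
        by_cases hlt : s[i.toNat]'(by omega) < s[j.toNat]'(by omega)
        · rw [if_pos hlt, if_pos hlt,
            ih (i + 1) (j - 1) pre (suf ++ [s[j.toNat]'(by omega)]) (by omega) (by omega) (by omega)]
          simp
        · rw [if_neg hlt, if_neg hlt,
            ih (i + 1) (j - 1) (pre ++ [s[i.toNat]'(by omega)]) suf (by omega) (by omega) (by omega)]
          simp
      · by_cases hii : i = j
        · subst hii
          have hci : PySem.List.pyGetD s i ' ' = s[i.toNat]'(by omega) :=
            PySem.List.pyGetD_eq_getElem s ' ' h0 (by omega)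
          rw [seg_single s i h0 (by omega), gp_single]
          simp [hci]
        · have hji : j < i := by omega
          rw [seg_nil s i j hji]
          simp [gp, hij, hii]

lemma seg_full (s : List Char) : seg s 0 ((s.length : Int) - 1) = s := by
  unfold seg
  have h : ((s.length : Int) - 1 - 0 + 1).toNat = s.length := by omega
  rw [h]
  simp

-- ===== VERDICT (by name: the statement is the Claim_ definition above) =====
theorem decrypt_word_spec : Claim_equal_decrypt_word := by
  intro word _
  unfold Spec_decrypt_word decrypt_word decrypt_word_alt
  show String.mk (decryptA word.toList) =
    String.mk ((loopB word.toList 0 ((word.toList.length : Int) - 1) [] []).1 ++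
      (loopB word.toList 0 ((word.toList.length : Int) - 1) [] []).2.reverse)
  rw [loopB_eq word.toList word.toList.length 0 ((word.toList.length : Int) - 1) [] []
      (by omega) (by omega) (by omega), seg_full]
  rw [decryptA_eq_gp]
  simp
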